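-- pv_equiv track=rewrite | github.com/Eddonofuture/DSDesafLatam | Introduccion a Programacion/Presencial 6/letra_x.py | letra_x
-- ===== SOURCE A (Python) =====
-- def letra_x(n):
--     varFinal = ""
--     rango = n-1
--     for i in range(0 , n):
--         lineaVertical = ""
--         for j in range(0 , n):
--             if(i==j):
--                 lineaVertical += "*"
--             elif((i+j)== rango):
--                 lineaVertical += "*"
--             else:
--                 lineaVertical += " "
--         varFinal += lineaVertical+"\n"
--     return (varFinal)
-- ===== SOURCE B (Python) =====
-- def letra_x(n):
--     out = []
--     for i in range(n):
--         row = [' '] * n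
--         row[i] = '*'
--         row[n - 1 - i] = '*'
--         out.append(''.join(row) + '\n')
--     return ''.join(out)
-- ===== Notes on version B (the rewrite author's own statement) =====
-- stated objective: simpler
-- what changed: B builds each row as a list of n spaces and writes '*' directly at the two star columns i and n-1-i, removing A's inner per-cell conditional loop.
import Mathlib
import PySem

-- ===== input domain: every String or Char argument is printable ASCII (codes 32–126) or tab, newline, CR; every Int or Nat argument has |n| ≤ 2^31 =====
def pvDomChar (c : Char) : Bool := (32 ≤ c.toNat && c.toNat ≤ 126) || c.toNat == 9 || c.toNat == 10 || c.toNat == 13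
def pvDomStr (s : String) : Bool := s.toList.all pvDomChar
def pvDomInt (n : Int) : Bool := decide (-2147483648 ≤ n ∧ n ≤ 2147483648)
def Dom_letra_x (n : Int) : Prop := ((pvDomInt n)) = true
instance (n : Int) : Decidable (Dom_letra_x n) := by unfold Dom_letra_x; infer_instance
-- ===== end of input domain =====

-- B writes '*' directly at the two star columns of a row of spaces instead of A's per-cell conditional scan (simpler decomposition).

-- ===== PORT A =====
def letra_x (n : Int) : String :=
  String.mk ((PySem.List.pyRange 0 n 1).foldl (fun varFinal i =>
    varFinal ++
      ((PySem.List.pyRange 0 n 1).foldl (fun linea j =>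
        linea ++ (if i = j then ['*'] else if i + j = n - 1 then ['*'] else [' '])) []) ++
      ['\n']) [])

-- ===== PORT B =====
def xRow (m : Nat) (i : Nat) : List Char :=
  ((List.replicate m ' ').set i '*').set (m - 1 - i) '*'

def letra_x_alt (n : Int) : String :=
  String.mk ((List.range n.toNat).foldl (fun out i => out ++ xRow n.toNat i ++ ['\n']) [])

-- ===== PRECONDITION & SPEC =====
def Spec_letra_x (n : Int) (out : String) : Prop := out = letra_x_alt n
instance (n : Int) (out : String) : Decidable (Spec_letra_x n out) := by unfold Spec_letra_x; infer_instance

-- ===== CLAIM (what is proved, stated in full; the proofs are below) =====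
def Claim_equal_letra_x : Prop := ∀ (n : Int), Dom_letra_x n → Spec_letra_x n (letra_x n)

-- ===== LEMMAS AND PROOFS =====

lemma ite_singleton (c d : Prop) [Decidable c] [Decidable d] (a b e : Char) :
    (if c then ([a] : List Char) else if d then [b] else [e]) =
      [if c then a else if d then b else e] := by
  split_ifs <;> rfl

lemma rowA_eq_xRow (m i : Nat) (hi : i < m) :
    (List.range m).map
        (fun (j : Nat) => if (i : Int) = (j : Int) then '*'
                  else if (i : Int) + (j : Int) = (m : Int) - 1 then '*' else ' ')
      = xRow m i := by
  apply List.ext_getElem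
  · simp [xRow]
  · intro j hj _
    simp only [List.length_map, List.length_range] at hj
    simp only [List.getElem_map, List.getElem_range, xRow, List.getElem_set,
      List.getElem_replicate]
    split_ifs <;> first | rfl | omega

-- ===== VERDICT (by name: the statement is the Claim_ definition above) =====

theorem letra_x_spec : Claim_equal_letra_x := by
  intro n _
  unfold Spec_letra_x letra_x letra_x_alt
  by_cases hn : n ≤ 0
  · rw [PySem.List.pyRange_one_eq_nil (by omega)]
    have : n.toNat = 0 := by omega
    simp [this]
  · rw [not_le] at hn
    have hm : ((n.toNat : Int)) = n := by omega
    rw [PySem.List.pyRange_one 0 n]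
    simp only [sub_zero, List.foldl_map, zero_add]
    congr 1
    apply PySem.List.foldl_congr_mem
    intro acc i hi
    simp only [List.mem_range] at hi
    rw [PySem.List.foldl_append_eq_flatMap]
    congr 1
    rw [← rowA_eq_xRow n.toNat i hi, List.map_eq_flatMap, List.nil_append]
    congr 1
    apply List.flatMap_congr
    intro j _
    rw [ite_singleton]
    rw [hm]
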